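-- pv_equiv track=rewrite | github.com/masaharu-kato-lab/firefly_algorithm | src/route_planning/firefly.py | is_valid_permutation
-- ===== SOURCE A (Python) =====
-- import copy
-- from typing import List, Dict, Tuple
--
-- Node = Tuple[int, int]
--
-- def is_valid_permutation(perm:List[Node], nodes:List[Node]):
--
--     nodes = copy.copy(nodes)
--
--     for node in perm:
--         # check if node is in nodes and not used yet
--         if(node in nodes):
--             nodes.remove(node)
--         else:
--             return False
--
--     # check if there are unuse nodes
--     if len(nodes):
--         return False
--
--     return True
-- ===== SOURCE B (Python) =====
-- def is_valid_permutation(perm, nodes):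
--     return sorted(perm) == sorted(nodes)
-- ===== Notes on version B (the rewrite author's own statement) =====
-- stated objective: simpler
-- what changed: Replaces the membership-test-and-remove loop over a mutated working copy with a single canonical-form comparison: sorted(perm) == sorted(nodes).
import Mathlib
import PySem

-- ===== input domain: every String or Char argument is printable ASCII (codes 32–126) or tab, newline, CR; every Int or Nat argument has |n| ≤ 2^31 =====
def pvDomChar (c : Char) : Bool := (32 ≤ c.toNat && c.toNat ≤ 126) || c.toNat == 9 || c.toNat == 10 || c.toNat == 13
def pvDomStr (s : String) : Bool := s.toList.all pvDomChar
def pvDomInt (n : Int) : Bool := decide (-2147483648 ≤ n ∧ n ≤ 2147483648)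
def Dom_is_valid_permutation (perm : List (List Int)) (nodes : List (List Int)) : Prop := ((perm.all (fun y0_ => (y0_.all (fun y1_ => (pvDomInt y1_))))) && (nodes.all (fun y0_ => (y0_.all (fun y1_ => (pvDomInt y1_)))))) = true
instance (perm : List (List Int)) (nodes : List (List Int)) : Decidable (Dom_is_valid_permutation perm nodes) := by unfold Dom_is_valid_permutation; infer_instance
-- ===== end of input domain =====

-- B replaces A's membership-and-remove loop by comparing the two sorted lists (simpler).
-- A copies its 'nodes' argument before mutating, so neither argument is observably mutated.

-- ===== PORT A =====
-- the for-loop of A: working copy 'nodes' shrinks by remove; else-branch returns False;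
-- after the loop, True iff the working copy is empty ('if len(nodes): return False').
def is_valid_permutation_loop (perm : List (List Int)) (nodes : List (List Int)) : Bool :=
  match perm with
  | [] => decide (nodes.length = 0)
  | node :: rest =>
    if nodes.contains node then
      match PySem.List.remove? nodes node with
      | some nodes' => is_valid_permutation_loop rest nodes'
      | none => false   -- unreachable: membership was just checked (totalization guard only)
    else false

def is_valid_permutation (perm : List (List Int)) (nodes : List (List Int)) : Bool :=
  is_valid_permutation_loop perm nodes

-- ===== PORT B =====
def is_valid_permutation_alt (perm : List (List Int)) (nodes : List (List Int)) : Bool :=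
  PySem.List.sorted perm (fun x => x) == PySem.List.sorted nodes (fun x => x)

-- ===== PRECONDITION & SPEC =====
def Spec_is_valid_permutation (perm : List (List Int)) (nodes : List (List Int)) (out : Bool) : Prop := out = is_valid_permutation_alt perm nodes
instance (perm : List (List Int)) (nodes : List (List Int)) (out : Bool) : Decidable (Spec_is_valid_permutation perm nodes out) := by unfold Spec_is_valid_permutation; infer_instance

-- ===== CLAIM (what is proved, stated in full; the proofs are below) =====
def Claim_equal_is_valid_permutation : Prop := ∀ (perm : List (List Int)) (nodes : List (List Int)), Dom_is_valid_permutation perm nodes → Spec_is_valid_permutation perm nodes (is_valid_permutation perm nodes)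

-- ===== LEMMAS AND PROOFS =====

-- A's loop succeeds exactly when perm is a multiset permutation of nodes.
theorem loop_eq_perm (perm nodes : List (List Int)) :
    is_valid_permutation_loop perm nodes = true ↔ perm.Perm nodes := by
  induction perm generalizing nodes with
  | nil =>
    simp [is_valid_permutation_loop, List.length_eq_zero_iff, eq_comm]
  | cons node rest ih =>
    simp only [is_valid_permutation_loop]
    by_cases hmem : node ∈ nodes
    · rw [PySem.List.remove?_eq_some_erase nodes node hmem]
      simp [hmem, ih, List.cons_perm_iff_perm_erase]
    · simp [List.contains_eq_mem, hmem]
      intro h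
      exact hmem (h.mem_iff.mp (List.mem_cons_self))

theorem is_valid_permutation_spec : Claim_equal_is_valid_permutation := by
  intro perm nodes _
  unfold Spec_is_valid_permutation is_valid_permutation is_valid_permutation_alt
  rw [Bool.eq_iff_iff, loop_eq_perm, beq_iff_eq]
  -- align the (propositionally equal) DecidableLT instances, then cite the library lemma
  have e : (fun (a b : List ℤ) => a.decidableLT b) = @LinearOrder.toDecidableLT (List ℤ) _ :=
    funext fun a => funext fun b => Subsingleton.elim _ _
  rw [show @PySem.List.sorted (List ℤ) (List ℤ) List.instLT (fun a b => a.decidableLT b)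
        = @PySem.List.sorted (List ℤ) (List ℤ) List.instLinearOrder.toLT LinearOrder.toDecidableLT by rw [e]]
  exact (PySem.List.sorted_id_eq_sorted_id_iff_perm perm nodes).symm
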